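-- pv_equiv track=rewrite | github.com/abnsol/Competitive-Programming | 31-Jan-2025/Separate the Digits in an Array 230552.py | separateDigits
-- ===== SOURCE A (Python) =====
-- from typing import List
--
-- def separateDigits(nums: List[int]) -> List[int]:
--     def digits(num):
--         ans = []
--         while num > 0:
--             ans.append(num % 10)
--             num //= 10
--
--         ans.reverse()
--         return ans
--
--     ans = []
--     for num in nums:
--         ans += digits(num)
--
--     return ans
-- ===== SOURCE B (Python) =====
-- from typing import List
--
-- def separateDigits(nums: List[int]) -> List[int]:
--     ans = []
--     for num in nums:
--         if num > 0:
--             ans.extend(ord(c) - 48 for c in str(num))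
--     return ans
-- ===== Notes on version B (the rewrite author's own statement) =====
-- stated objective: idiomatic
-- what changed: Digits are read off the decimal string representation (str + ord) in natural left-to-right order instead of being extracted arithmetically with % 10 and //= 10 and then reversed.
import Mathlib
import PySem

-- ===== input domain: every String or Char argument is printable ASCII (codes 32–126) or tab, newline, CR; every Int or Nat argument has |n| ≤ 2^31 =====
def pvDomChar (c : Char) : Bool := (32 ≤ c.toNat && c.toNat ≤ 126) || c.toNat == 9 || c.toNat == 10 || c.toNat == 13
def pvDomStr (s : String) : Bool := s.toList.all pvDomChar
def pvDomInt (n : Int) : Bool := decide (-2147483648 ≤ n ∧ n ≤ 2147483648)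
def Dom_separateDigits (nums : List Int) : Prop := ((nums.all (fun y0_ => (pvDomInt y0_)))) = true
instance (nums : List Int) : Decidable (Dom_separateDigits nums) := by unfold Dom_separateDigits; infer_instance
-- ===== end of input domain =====

-- B reads each number's digits off its decimal string (str + ord) left to right, instead of
-- A's arithmetic % 10 / //= 10 extraction followed by a reverse; same cost, more idiomatic.

-- ===== PORT A =====
-- the inner 'while num > 0: ans.append(num % 10); num //= 10' loop of A's helper `digits`
def pvDigitsLoop (num : Int) (ans : List Int) : List Int :=
  if h : 0 < num then
    pvDigitsLoop (PySem.Int.floordiv num 10) (ans ++ [PySem.Int.mod num 10])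
  else ans
termination_by num.toNat
decreasing_by
  simp only [PySem.Int.floordiv]
  have h1 : num.fdiv 10 = (num.toNat / 10 : Nat) := by
    rw [Int.ofNat_fdiv]; congr 1; omega
  rw [h1]; simp only [Int.toNat_natCast]; omega

-- A's helper `digits`: run the loop, then reverse
def pvDigitsA (num : Int) : List Int := (pvDigitsLoop num []).reverse

def separateDigits (nums : List Int) : List Int :=
  nums.foldl (fun ans num => ans ++ pvDigitsA num) []

-- ===== PORT B =====
def separateDigits_alt (nums : List Int) : List Int :=
  nums.foldl (fun ans num =>
    if 0 < num then
      ans ++ (PySem.Int.toStr num).toList.map (fun c => (c.toNat : Int) - 48)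
    else ans) []

-- ===== PRECONDITION & SPEC =====
def Spec_separateDigits (nums : List Int) (out : List Int) : Prop := out = separateDigits_alt nums
instance (nums : List Int) (out : List Int) : Decidable (Spec_separateDigits nums out) := by unfold Spec_separateDigits; infer_instance

-- ===== CLAIM (what is proved, stated in full; the proofs are below) =====
def Claim_equal_separateDigits : Prop := ∀ (nums : List Int), Dom_separateDigits nums → Spec_separateDigits nums (separateDigits nums)

-- ===== LEMMAS AND PROOFS =====

-- big-endian decimal character digits of a natural number
def pvBE (n : Nat) : List Char :=
  if h : n < 10 then [Nat.digitChar n] else pvBE (n / 10) ++ [Nat.digitChar (n % 10)]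
decreasing_by omega

-- little-endian decimal integer digits of a natural number
def pvLE (n : Nat) : List Int :=
  if h : n = 0 then [] else ((n % 10 : Nat) : Int) :: pvLE (n / 10)
decreasing_by omega

theorem pv_digitChar_val (d : Nat) (hd : d < 10) :
    ((Nat.digitChar d).toNat : Int) - 48 = (d : Int) := by
  interval_cases d <;> decide

theorem pv_core_eq (f : Nat) : ∀ (n : Nat) (acc : List Char), n < f →
    Nat.toDigitsCore 10 f n acc = pvBE n ++ acc := by
  induction f with
  | zero => intro n acc h; omega
  | succ f ih =>
    intro n acc h
    rw [Nat.toDigitsCore]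
    by_cases h10 : n < 10
    · have : n / 10 = 0 := Nat.div_eq_of_lt h10
      rw [pvBE]
      simp [h10, this, Nat.mod_eq_of_lt h10]
    · have hne : ¬ n / 10 = 0 := by omega
      rw [if_neg hne, ih (n / 10) _ (by omega)]
      conv_rhs => rw [pvBE]
      rw [dif_neg h10, List.append_assoc]
      rfl

theorem pv_loop_eq : ∀ (n : Nat) (acc : List Int),
    pvDigitsLoop (n : Int) acc = acc ++ pvLE n := by
  intro n
  induction n using Nat.strong_induction_on with
  | _ n ih =>
    intro acc
    by_cases h0 : n = 0
    · subst h0; rw [pvDigitsLoop, pvLE]; simp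
    · rw [pvDigitsLoop, dif_pos (by exact_mod_cast Nat.pos_of_ne_zero h0)]
      have hd : PySem.Int.floordiv (n : Int) 10 = ((n / 10 : Nat) : Int) := by
        rw [PySem.Int.floordiv]; exact_mod_cast (Int.ofNat_fdiv n 10).symm
      have hm : PySem.Int.mod (n : Int) 10 = ((n % 10 : Nat) : Int) := by
        rw [PySem.Int.mod]; exact_mod_cast (Int.ofNat_fmod n 10).symm
      rw [hd, hm, ih (n / 10) (by omega)]
      conv_rhs => rw [pvLE]
      rw [dif_neg h0]
      simp

theorem pv_rev_eq : ∀ (n : Nat), 0 < n →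
    (pvLE n).reverse = (pvBE n).map (fun c => (c.toNat : Int) - 48) := by
  intro n
  induction n using Nat.strong_induction_on with
  | _ n ih =>
    intro hn
    rw [pvLE, dif_neg (by omega)]
    by_cases h10 : n < 10
    · have : n / 10 = 0 := Nat.div_eq_of_lt h10
      rw [this, pvLE, dif_pos rfl, pvBE, dif_pos h10]
      simp [Nat.mod_eq_of_lt h10, pv_digitChar_val n h10]
    · rw [pvBE, dif_neg h10]
      simp only [List.reverse_cons, List.map_append, List.map_cons, List.map_nil,
        ih (n / 10) (by omega) (by omega), pv_digitChar_val (n % 10) (by omega)]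

-- A's per-element digits equal B's per-element string digits
theorem pv_elem_eq (num : Int) :
    pvDigitsA num =
      (if 0 < num then (PySem.Int.toStr num).toList.map (fun c => (c.toNat : Int) - 48)
       else []) := by
  by_cases h : 0 < num
  · rw [if_pos h]
    have hn : num = ((num.toNat : Nat) : Int) := by omega
    have hchars : (PySem.Int.toStr num).toList = pvBE num.toNat := by
      rw [PySem.Int.toList_toStr]
      simp only [PySem.Int.toChars, if_neg (by omega : ¬ num < 0), Nat.toDigits]
      rw [pv_core_eq (num.toNat + 1) num.toNat [] (by omega)]
      simp
    rw [pvDigitsA, hchars]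
    conv_lhs => rw [hn]
    rw [pv_loop_eq, List.nil_append, pv_rev_eq num.toNat (by omega)]
  · rw [if_neg h, pvDigitsA, pvDigitsLoop, dif_neg h, List.reverse_nil]

-- ===== VERDICT (by name: the statement is the Claim_ definition above) =====
theorem separateDigits_spec : Claim_equal_separateDigits := by
  intro nums _
  unfold Spec_separateDigits separateDigits separateDigits_alt
  congr 1
  funext ans num
  rw [pv_elem_eq]
  by_cases h : 0 < num <;> simp [h]
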